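-- pv_equiv track=rewrite | github.com/Outer-Void/blux-guard | blux_cli/widgets/logs_view.py | analyze_log_patterns
-- ===== SOURCE A (Python) =====
-- from typing import List, Dict, Optional, Any, Callable
--
-- def analyze_log_patterns(log_content: str) -> Dict[str, Any]:
--     """
--     Analyze log content for patterns and security events
--     """
--     patterns = {
--         "errors": 0,
--         "warnings": 0,
--         "security_events": 0,
--         "recent_activity": 0
--     }
--
--     lines = log_content.split('\n')
--     patterns["total_lines"] = len(lines)
--
--     for line in lines:
--         line_lower = line.lower()
--
--         # Error patterns
--         if any(error in line_lower for error in ['error', 'exception', 'failed', 'failure']):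
--             patterns["errors"] += 1
--
--         # Warning patterns
--         if any(warning in line_lower for warning in ['warning', 'warn', 'caution']):
--             patterns["warnings"] += 1
--
--         # Security event patterns
--         security_terms = ['denied', 'unauthorized', 'forbidden', 'intrusion', 'breach', 'attack']
--         if any(term in line_lower for term in security_terms):
--             patterns["security_events"] += 1
--
--     # Calculate recent activity (last 100 lines)
--     recent_lines = lines[-100:] if len(lines) > 100 else lines
--     patterns["recent_activity"] = len([line for line in recent_lines if line.strip()])
--
--     return patterns
-- ===== SOURCE B (Python) =====
-- def analyze_log_patterns(log_content: str):
--     lines = log_content.split('\n')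
--
--     def count(keywords):
--         return sum(1 for line in lines if any(k in line.lower() for k in keywords))
--
--     recent = lines[-100:] if len(lines) > 100 else lines
--     return {
--         "errors": count(['error', 'exception', 'failed', 'failure']),
--         "warnings": count(['warning', 'warn', 'caution']),
--         "security_events": count(['denied', 'unauthorized', 'forbidden',
--                                   'intrusion', 'breach', 'attack']),
--         "recent_activity": len([line for line in recent if line.strip()]),
--         "total_lines": len(lines),
--     }
-- ===== Notes on version B (the rewrite author's own statement) =====
-- stated objective: simpler
-- what changed: Replaces A's single fused loop that mutates a pre-initialised counter dict with three independent keyword-counting passes (a shared count helper) and a dict literal assembled once at the end.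
import Mathlib
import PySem

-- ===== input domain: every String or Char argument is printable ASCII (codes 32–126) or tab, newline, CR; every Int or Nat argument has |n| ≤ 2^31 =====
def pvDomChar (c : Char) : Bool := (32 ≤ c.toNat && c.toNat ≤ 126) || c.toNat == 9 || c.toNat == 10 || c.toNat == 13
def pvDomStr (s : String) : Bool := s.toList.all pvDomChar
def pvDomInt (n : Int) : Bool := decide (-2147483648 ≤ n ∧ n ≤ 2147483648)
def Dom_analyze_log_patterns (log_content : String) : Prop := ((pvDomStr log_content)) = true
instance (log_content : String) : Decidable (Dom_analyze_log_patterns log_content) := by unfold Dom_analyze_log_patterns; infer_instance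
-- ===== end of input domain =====

-- B replaces A's single fused loop mutating a pre-initialised counter dict by three
-- independent keyword-counting passes and a dict assembled once at the end (objective: simpler).

-- ===== PORT A =====
def pvErrKw : List String := ["error", "exception", "failed", "failure"]
def pvWarnKw : List String := ["warning", "warn", "caution"]
def pvSecKw : List String := ["denied", "unauthorized", "forbidden", "intrusion", "breach", "attack"]

-- the body of A's `for line in lines:` loop
def pvLoopBody (d : PySem.Dict String Int) (line : String) : PySem.Dict String Int :=
  let line_lower := PySem.Str.lower line
  let d := if pvErrKw.any (fun e => PySem.Str.isIn e line_lower) then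
             d.insert "errors" (d.getD "errors" 0 + 1) else d
  let d := if pvWarnKw.any (fun w => PySem.Str.isIn w line_lower) then
             d.insert "warnings" (d.getD "warnings" 0 + 1) else d
  if pvSecKw.any (fun t => PySem.Str.isIn t line_lower) then
    d.insert "security_events" (d.getD "security_events" 0 + 1) else d

def analyze_log_patterns (log_content : String) : List (String × Int) :=
  let patterns : PySem.Dict String Int :=
    PySem.Dict.ofList [("errors", 0), ("warnings", 0), ("security_events", 0), ("recent_activity", 0)]
  let lines := (PySem.Str.split? log_content "\n").getD []
  let patterns := patterns.insert "total_lines" (lines.length : Int)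
  let patterns := lines.foldl pvLoopBody patterns
  let recent_lines := if lines.length > 100 then PySem.List.slice lines (some (-100)) none else lines
  let patterns := patterns.insert "recent_activity"
    ((recent_lines.filter (fun line => !(PySem.Str.strip line == ""))).length : Int)
  patterns.items

-- ===== PORT B =====
-- Source B's `count` helper: sum of 1 over the lines containing one of the keywords
def pvCount (lines : List String) (kws : List String) : Int :=
  ((lines.filter (fun line => kws.any (fun k => PySem.Str.isIn k (PySem.Str.lower line)))).map
    (fun _ => (1 : Int))).sum

def analyze_log_patterns_alt (log_content : String) : List (String × Int) :=
  let lines := (PySem.Str.split? log_content "\n").getD []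
  let recent := if lines.length > 100 then PySem.List.slice lines (some (-100)) none else lines
  [("errors", pvCount lines ["error", "exception", "failed", "failure"]),
   ("warnings", pvCount lines ["warning", "warn", "caution"]),
   ("security_events", pvCount lines ["denied", "unauthorized", "forbidden", "intrusion", "breach", "attack"]),
   ("recent_activity", ((recent.filter (fun line => !(PySem.Str.strip line == ""))).length : Int)),
   ("total_lines", (lines.length : Int))]

-- ===== PRECONDITION & SPEC =====
def Spec_analyze_log_patterns (log_content : String) (out : List (String × Int)) : Prop := out = analyze_log_patterns_alt log_content
instance (log_content : String) (out : List (String × Int)) : Decidable (Spec_analyze_log_patterns log_content out) := by unfold Spec_analyze_log_patterns; infer_instance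

-- ===== CLAIM (what is proved, stated in full; the proofs are below) =====
def Claim_equal_analyze_log_patterns : Prop := ∀ (log_content : String), Dom_analyze_log_patterns log_content → Spec_analyze_log_patterns log_content (analyze_log_patterns log_content)

-- ===== LEMMAS AND PROOFS =====

-- lookups and overwrites on the loop's five-key literal dict (all definitional)
lemma pvGetD_err (a b c r T : Int) :
    (PySem.Dict.mk [("errors", a), ("warnings", b), ("security_events", c),
      ("recent_activity", r), ("total_lines", T)]).getD "errors" 0 = a := rfl

lemma pvGetD_warn (a b c r T : Int) :
    (PySem.Dict.mk [("errors", a), ("warnings", b), ("security_events", c),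
      ("recent_activity", r), ("total_lines", T)]).getD "warnings" 0 = b := rfl

lemma pvGetD_sec (a b c r T : Int) :
    (PySem.Dict.mk [("errors", a), ("warnings", b), ("security_events", c),
      ("recent_activity", r), ("total_lines", T)]).getD "security_events" 0 = c := rfl

lemma pvIns_err (a b c r T v : Int) :
    (PySem.Dict.mk [("errors", a), ("warnings", b), ("security_events", c),
      ("recent_activity", r), ("total_lines", T)]).insert "errors" v
    = PySem.Dict.mk [("errors", v), ("warnings", b), ("security_events", c),
      ("recent_activity", r), ("total_lines", T)] := rfl

lemma pvIns_warn (a b c r T v : Int) :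
    (PySem.Dict.mk [("errors", a), ("warnings", b), ("security_events", c),
      ("recent_activity", r), ("total_lines", T)]).insert "warnings" v
    = PySem.Dict.mk [("errors", a), ("warnings", v), ("security_events", c),
      ("recent_activity", r), ("total_lines", T)] := rfl

lemma pvIns_sec (a b c r T v : Int) :
    (PySem.Dict.mk [("errors", a), ("warnings", b), ("security_events", c),
      ("recent_activity", r), ("total_lines", T)]).insert "security_events" v
    = PySem.Dict.mk [("errors", a), ("warnings", b), ("security_events", v),
      ("recent_activity", r), ("total_lines", T)] := rfl

lemma pvIns_rec (a b c r T v : Int) :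
    (PySem.Dict.mk [("errors", a), ("warnings", b), ("security_events", c),
      ("recent_activity", r), ("total_lines", T)]).insert "recent_activity" v
    = PySem.Dict.mk [("errors", a), ("warnings", b), ("security_events", c),
      ("recent_activity", v), ("total_lines", T)] := rfl

lemma pvCount_eq_countP (lines kws : List String) :
    pvCount lines kws =
      ((lines.countP (fun line => kws.any (fun k => PySem.Str.isIn k (PySem.Str.lower line))) : Nat) : Int) := by
  simp [pvCount, List.countP_eq_length_filter]

lemma pvStep (a b c r T : Int) (l : String) :
    pvLoopBody (PySem.Dict.mk [("errors", a), ("warnings", b), ("security_events", c),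
      ("recent_activity", r), ("total_lines", T)]) l
    = PySem.Dict.mk
        [("errors", if pvErrKw.any (fun e => PySem.Str.isIn e (PySem.Str.lower l)) then a + 1 else a),
         ("warnings", if pvWarnKw.any (fun w => PySem.Str.isIn w (PySem.Str.lower l)) then b + 1 else b),
         ("security_events", if pvSecKw.any (fun t => PySem.Str.isIn t (PySem.Str.lower l)) then c + 1 else c),
         ("recent_activity", r), ("total_lines", T)] := by
  simp only [pvLoopBody]
  split_ifs <;>
    simp only [pvGetD_err, pvIns_err, pvGetD_warn, pvIns_warn, pvGetD_sec, pvIns_sec]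

-- the fold of A's loop body over the five-key dict, in closed form
lemma pvFold_closed (ls : List String) (a b c r T : Int) :
    ls.foldl pvLoopBody
      (PySem.Dict.mk [("errors", a), ("warnings", b), ("security_events", c),
                      ("recent_activity", r), ("total_lines", T)])
    = PySem.Dict.mk
        [("errors", a + ((ls.countP (fun l => pvErrKw.any (fun e => PySem.Str.isIn e (PySem.Str.lower l))) : Nat) : Int)),
         ("warnings", b + ((ls.countP (fun l => pvWarnKw.any (fun w => PySem.Str.isIn w (PySem.Str.lower l))) : Nat) : Int)),
         ("security_events", c + ((ls.countP (fun l => pvSecKw.any (fun t => PySem.Str.isIn t (PySem.Str.lower l))) : Nat) : Int)),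
         ("recent_activity", r), ("total_lines", T)] := by
  induction ls generalizing a b c with
  | nil => simp
  | cons l ls ih =>
    rw [List.foldl_cons, pvStep, ih]
    simp only [List.countP_cons, PySem.Dict.mk.injEq, List.cons.injEq, Prod.mk.injEq,
      and_true, true_and]
    refine ⟨?_, ?_, ?_⟩ <;> split_ifs <;> simp <;> ring

-- the whole pipeline of A, for an arbitrary line list and recent-activity count
lemma pv_main (ls : List String) (R : Int) :
    ((List.foldl pvLoopBody
        ((PySem.Dict.ofList [("errors", (0:Int)), ("warnings", 0), ("security_events", 0),
          ("recent_activity", 0)]).insert "total_lines" (ls.length : Int)) ls).insert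
        "recent_activity" R).items
    = [("errors", pvCount ls ["error", "exception", "failed", "failure"]),
       ("warnings", pvCount ls ["warning", "warn", "caution"]),
       ("security_events", pvCount ls ["denied", "unauthorized", "forbidden", "intrusion", "breach", "attack"]),
       ("recent_activity", R), ("total_lines", (ls.length : Int))] := by
  have h0 : (PySem.Dict.ofList [("errors", (0:Int)), ("warnings", 0), ("security_events", 0),
      ("recent_activity", 0)]).insert "total_lines" (ls.length : Int)
      = PySem.Dict.mk [("errors", 0), ("warnings", 0), ("security_events", 0),
          ("recent_activity", 0), ("total_lines", (ls.length : Int))] := rfl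
  rw [h0, pvFold_closed, pvIns_rec, pvCount_eq_countP, pvCount_eq_countP, pvCount_eq_countP]
  simp [pvErrKw, pvWarnKw, pvSecKw]

-- ===== VERDICT (by name: the statement is the Claim_ definition above) =====
theorem analyze_log_patterns_spec : Claim_equal_analyze_log_patterns := by
  intro log_content _
  show analyze_log_patterns log_content = analyze_log_patterns_alt log_content
  unfold analyze_log_patterns analyze_log_patterns_alt
  exact pv_main _ _
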